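-- pv_equiv track=rewrite | github.com/LeHTVy/rutx | osint_intelligence.py | _score_subdomain_name
-- ===== SOURCE A (Python) =====
-- def _score_subdomain_name(name: str) -> tuple:
--     """Score based on subdomain name"""
--     score = 0
--     reasons = []
--
--     # CRITICAL keywords (4 points)
--     critical = ["api", "admin", "payment", "auth", "sso", "oauth"]
--     if any(kw in name for kw in critical):
--         score += 4
--         reasons.append(f"Critical subdomain name: {name}")
--
--     # HIGH VALUE keywords (3 points)
--     elif any(kw in name for kw in ["dashboard", "portal", "console", "manage"]):
--         score += 3
--         reasons.append(f"High-value subdomain: {name}")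
--
--     # MEDIUM keywords (2 points)
--     elif any(kw in name for kw in ["dev", "staging", "test", "internal"]):
--         score += 2
--         reasons.append(f"Development/internal subdomain: {name}")
--
--     # STANDARD keywords (1 point)
--     elif any(kw in name for kw in ["mail", "www", "blog", "docs"]):
--         score += 1
--         reasons.append(f"Standard subdomain: {name}")
--
--     return score, reasons
-- ===== SOURCE B (Python) =====
-- _KW_SCORE = {
--     "api": 4, "admin": 4, "payment": 4, "auth": 4, "sso": 4, "oauth": 4,
--     "dashboard": 3, "portal": 3, "console": 3, "manage": 3,
--     "dev": 2, "staging": 2, "test": 2, "internal": 2,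
--     "mail": 1, "www": 1, "blog": 1, "docs": 1,
-- }
--
-- _PREFIX = {
--     4: "Critical subdomain name: ",
--     3: "High-value subdomain: ",
--     2: "Development/internal subdomain: ",
--     1: "Standard subdomain: ",
-- }
--
-- def _score_subdomain_name(name: str) -> tuple:
--     best = 0
--     for kw, s in _KW_SCORE.items():
--         if kw in name and s > best:
--             best = s
--     if best == 0:
--         return 0, []
--     return best, [_PREFIX[best] + name]
-- ===== Notes on version B (the rewrite author's own statement) =====
-- stated objective: alternative
-- what changed: B flattens the four tiers into one keyword->score map and computes the maximum matching score in a single order-independent pass over all keywords, then derives the reason text from a score->prefix table; A instead walks a priority if/elif chain with early tier selection and list accumulators.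
import Mathlib
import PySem

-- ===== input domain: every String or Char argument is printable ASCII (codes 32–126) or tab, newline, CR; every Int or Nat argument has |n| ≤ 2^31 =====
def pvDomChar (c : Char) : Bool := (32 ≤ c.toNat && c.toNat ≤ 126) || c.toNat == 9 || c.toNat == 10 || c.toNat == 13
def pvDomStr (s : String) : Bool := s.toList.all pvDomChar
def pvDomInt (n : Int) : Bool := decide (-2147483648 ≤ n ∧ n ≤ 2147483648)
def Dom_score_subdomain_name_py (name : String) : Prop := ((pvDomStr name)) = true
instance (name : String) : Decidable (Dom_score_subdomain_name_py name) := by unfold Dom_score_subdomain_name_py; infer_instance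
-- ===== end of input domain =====

-- B computes the max matching score over a flat keyword->score map instead of A's priority if/elif chain; objective: alternative.


-- ===== PORT A =====
def score_subdomain_name_py (name : String) : Int × List String :=
  let score : Int := 0
  let reasons : List String := []
  let critical := ["api", "admin", "payment", "auth", "sso", "oauth"]
  if critical.any (fun kw => PySem.Str.isIn kw name) then
    (score + 4, reasons ++ ["Critical subdomain name: " ++ name])
  else if (["dashboard", "portal", "console", "manage"]).any (fun kw => PySem.Str.isIn kw name) then
    (score + 3, reasons ++ ["High-value subdomain: " ++ name])
  else if (["dev", "staging", "test", "internal"]).any (fun kw => PySem.Str.isIn kw name) then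
    (score + 2, reasons ++ ["Development/internal subdomain: " ++ name])
  else if (["mail", "www", "blog", "docs"]).any (fun kw => PySem.Str.isIn kw name) then
    (score + 1, reasons ++ ["Standard subdomain: " ++ name])
  else
    (score, reasons)

-- ===== PORT B =====
-- flat keyword -> score map, in Source B's dict insertion order
def pvKwScores : List (String × Int) :=
  [("api", 4), ("admin", 4), ("payment", 4), ("auth", 4), ("sso", 4), ("oauth", 4),
   ("dashboard", 3), ("portal", 3), ("console", 3), ("manage", 3),
   ("dev", 2), ("staging", 2), ("test", 2), ("internal", 2),
   ("mail", 1), ("www", 1), ("blog", 1), ("docs", 1)]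

def pvPrefix : PySem.Dict Int String :=
  PySem.Dict.ofList
    [(4, "Critical subdomain name: "), (3, "High-value subdomain: "),
     (2, "Development/internal subdomain: "), (1, "Standard subdomain: ")]

def score_subdomain_name_py_alt (name : String) : Int × List String :=
  let best : Int :=
    pvKwScores.foldl (fun b p => if PySem.Str.isIn p.1 name ∧ b < p.2 then p.2 else b) 0
  if best = 0 then (0, [])
  else (best, [PySem.Dict.getD pvPrefix best "" ++ name])

-- ===== PRECONDITION & SPEC =====
def Spec_score_subdomain_name_py (name : String) (out : Int × List String) : Prop := out = score_subdomain_name_py_alt name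
instance (name : String) (out : Int × List String) : Decidable (Spec_score_subdomain_name_py name out) := by unfold Spec_score_subdomain_name_py; infer_instance

-- ===== CLAIM (what is proved, stated in full; the proofs are below) =====
def Claim_equal_score_subdomain_name_py : Prop := ∀ (name : String), Dom_score_subdomain_name_py name → Spec_score_subdomain_name_py name (score_subdomain_name_py name)

-- ===== LEMMAS AND PROOFS =====

-- folding a tier of keywords that all carry the same score s updates the running max
-- to s iff some keyword of the tier matches (and s beats the accumulator)
theorem pv_fold_tier (q : String → Bool) (s : Int) :
    ∀ (kws : List String) (b : Int),
      (kws.map (fun kw => (kw, s))).foldl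
          (fun b p => if q p.1 ∧ b < p.2 then p.2 else b) b
        = if kws.any q then (if b < s then s else b) else b := by
  intro kws
  induction kws with
  | nil => intro b; simp
  | cons kw rest ih =>
    intro b
    simp only [List.map_cons, List.foldl_cons, List.any_cons]
    by_cases h : q kw = true
    · by_cases hb : b < s
      · rw [if_pos ⟨h, hb⟩, ih s]
        simp [h, hb]
      · rw [if_neg (by tauto), ih b]
        simp [h, hb]
    · rw [if_neg (by tauto), ih b]
      simp [h]

theorem pvKwScores_split :
    pvKwScores =
      ((["api", "admin", "payment", "auth", "sso", "oauth"]).map (fun kw => (kw, (4 : Int))))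
        ++ ((["dashboard", "portal", "console", "manage"]).map (fun kw => (kw, (3 : Int))))
        ++ ((["dev", "staging", "test", "internal"]).map (fun kw => (kw, (2 : Int))))
        ++ ((["mail", "www", "blog", "docs"]).map (fun kw => (kw, (1 : Int)))) := by
  rfl

theorem pvPrefix_4 : PySem.Dict.getD pvPrefix 4 "" = "Critical subdomain name: " := rfl
theorem pvPrefix_3 : PySem.Dict.getD pvPrefix 3 "" = "High-value subdomain: " := rfl
theorem pvPrefix_2 : PySem.Dict.getD pvPrefix 2 "" = "Development/internal subdomain: " := rfl
theorem pvPrefix_1 : PySem.Dict.getD pvPrefix 1 "" = "Standard subdomain: " := rfl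

-- ===== VERDICT (by name: the statement is the Claim_ definition above) =====
theorem score_subdomain_name_py_spec : Claim_equal_score_subdomain_name_py := by
  intro name _
  unfold Spec_score_subdomain_name_py score_subdomain_name_py score_subdomain_name_py_alt
  rw [pvKwScores_split]
  simp only [List.foldl_append]
  rw [pv_fold_tier (fun kw => PySem.Str.isIn kw name) 4,
      pv_fold_tier (fun kw => PySem.Str.isIn kw name) 3,
      pv_fold_tier (fun kw => PySem.Str.isIn kw name) 2,
      pv_fold_tier (fun kw => PySem.Str.isIn kw name) 1]
  by_cases h1 : (["api", "admin", "payment", "auth", "sso", "oauth"]).any (fun kw => PySem.Str.isIn kw name) = true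
  · rw [if_pos h1, if_pos h1]
    norm_num [pvPrefix_4]
  · rw [if_neg h1, if_neg h1]
    by_cases h2 : (["dashboard", "portal", "console", "manage"]).any (fun kw => PySem.Str.isIn kw name) = true
    · rw [if_pos h2, if_pos h2]
      norm_num [pvPrefix_3]
    · rw [if_neg h2, if_neg h2]
      by_cases h3 : (["dev", "staging", "test", "internal"]).any (fun kw => PySem.Str.isIn kw name) = true
      · rw [if_pos h3, if_pos h3]
        norm_num [pvPrefix_2]
      · rw [if_neg h3, if_neg h3]
        by_cases h4 : (["mail", "www", "blog", "docs"]).any (fun kw => PySem.Str.isIn kw name) = true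
        · rw [if_pos h4, if_pos h4]
          norm_num [pvPrefix_1]
        · rw [if_neg h4, if_neg h4]
          norm_num
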